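-- pv_equiv track=rewrite | github.com/arsulesandy/cutin-risk-analysis | src/cutin_risk/encoding/sfc_binary.py | hilbert_index_2d
-- ===== SOURCE A (Python) =====
-- def _hilbert_rot(n: int, x: int, y: int, rx: int, ry: int) -> tuple[int, int]:
--     """Hilbert helper: rotate/flip coordinates in one recursion quadrant."""
--     if ry == 0:
--         if rx == 1:
--             x = n - 1 - x
--             y = n - 1 - y
--         x, y = y, x
--     return x, y
--
-- def hilbert_index_2d(n_bits: int, x: int, y: int) -> int:
--     """
--     Convert (x,y) to Hilbert distance d for grid size 2^n_bits.
--     Here we use n_bits=2 for 4x4.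
--     """
--     n = 1 << n_bits
--     d = 0
--     s = n >> 1
--     while s > 0:
--         rx = 1 if (x & s) else 0
--         ry = 1 if (y & s) else 0
--         d += s * s * ((3 * rx) ^ ry)
--         x, y = _hilbert_rot(s, x, y, rx, ry)
--         s >>= 1
--     return int(d)
-- ===== SOURCE B (Python) =====
-- # Table-driven Hilbert index: a 4-state machine over the quadrant bits,
-- # MSB to LSB, instead of rotating/flipping the coordinates each level.
-- _HILBERT_DIGIT = ((0, 1, 3, 2), (0, 3, 1, 2), (2, 1, 3, 0), (2, 3, 1, 0))
-- _HILBERT_NEXT = ((1, 0, 2, 0), (0, 3, 1, 1), (2, 2, 0, 3), (3, 1, 3, 2))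
--
-- def hilbert_index_2d(n_bits: int, x: int, y: int) -> int:
--     d = 0
--     state = 0
--     for i in range(n_bits - 1, -1, -1):
--         q = (((x >> i) & 1) << 1) | ((y >> i) & 1)
--         d = (d << 2) | _HILBERT_DIGIT[state][q]
--         state = _HILBERT_NEXT[state][q]
--     return d
-- ===== Notes on version B (the rewrite author's own statement) =====
-- stated objective: faster
-- what changed: Replaces the rotate/flip coordinate-mutating loop by a precomputed 4-state Hilbert state machine that reads one quadrant bit-pair per level and emits two index bits, never forming s*s or rewriting full-width coordinates.
import Mathlib
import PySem

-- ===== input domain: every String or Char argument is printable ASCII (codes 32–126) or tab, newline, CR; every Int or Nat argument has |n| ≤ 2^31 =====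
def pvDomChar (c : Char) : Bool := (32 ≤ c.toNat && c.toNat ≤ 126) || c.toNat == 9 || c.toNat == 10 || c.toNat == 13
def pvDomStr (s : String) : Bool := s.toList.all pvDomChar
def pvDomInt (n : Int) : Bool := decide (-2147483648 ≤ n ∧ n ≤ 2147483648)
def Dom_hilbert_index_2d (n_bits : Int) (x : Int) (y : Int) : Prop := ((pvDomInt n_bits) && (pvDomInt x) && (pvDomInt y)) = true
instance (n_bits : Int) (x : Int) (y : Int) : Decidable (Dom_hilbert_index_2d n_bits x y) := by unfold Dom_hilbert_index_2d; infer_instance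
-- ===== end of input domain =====

-- ===== PORT A =====
-- B replaces the rotate/flip coordinate loop by a table-driven 4-state machine over
-- the quadrant bits (objective: faster; no big s*s product or coordinate rewriting).
-- Python helper _hilbert_rot, transliterated (branches in source order).
def pvHilbertRot (n : Int) (x : Int) (y : Int) (rx : Int) (ry : Int) : Int × Int :=
  if ry = 0 then
    let p := if rx = 1 then (n - 1 - x, n - 1 - y) else (x, y)
    (p.2, p.1)
  else (x, y)

-- the 'while s > 0' loop of A, state (x, y, d), s halving each iteration
def pvHilbertLoop (s : Int) (x : Int) (y : Int) (d : Int) : Int :=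
  if h : 0 < s then
    let rx : Int := if PySem.Int.band x s ≠ 0 then 1 else 0
    let ry : Int := if PySem.Int.band y s ≠ 0 then 1 else 0
    let d' := d + s * s * PySem.Int.bxor (3 * rx) ry
    let p := pvHilbertRot s x y rx ry
    pvHilbertLoop (s >>> (1:Nat)) p.1 p.2 d'
  else d
termination_by s.toNat
decreasing_by
  have : s >>> (1:Nat) = s / 2 := by simpa using Int.shiftRight_eq_div_pow s 1
  rw [this]; omega

-- 'n = 1 << n_bits' (Python raises ValueError for n_bits < 0: excluded by Pre_, hence .toNat);
-- the final 'int(d)' is the identity on int.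
def hilbert_index_2d (n_bits : Int) (x : Int) (y : Int) : Int :=
  let n : Int := (1 : Int) <<< n_bits.toNat
  pvHilbertLoop (n >>> (1:Nat)) x y 0

-- ===== PORT B =====
-- _HILBERT_DIGIT[st][q] and _HILBERT_NEXT[st][q]; st and q are always in 0..3 in B's loop,
-- so the tuple-of-tuples lookups are ported as total tables (out-of-range rows unreachable).
def pvDigitTable (st : Int) (q : Int) : Int :=
  match st, q with
  | 0, 0 => 0 | 0, 1 => 1 | 0, 2 => 3 | 0, 3 => 2
  | 1, 0 => 0 | 1, 1 => 3 | 1, 2 => 1 | 1, 3 => 2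
  | 2, 0 => 2 | 2, 1 => 1 | 2, 2 => 3 | 2, 3 => 0
  | 3, 0 => 2 | 3, 1 => 3 | 3, 2 => 1 | 3, 3 => 0
  | _, _ => 0

def pvNextTable (st : Int) (q : Int) : Int :=
  match st, q with
  | 0, 0 => 1 | 0, 1 => 0 | 0, 2 => 2 | 0, 3 => 0
  | 1, 0 => 0 | 1, 1 => 3 | 1, 2 => 1 | 1, 3 => 1
  | 2, 0 => 2 | 2, 1 => 2 | 2, 2 => 0 | 2, 3 => 3
  | 3, 0 => 3 | 3, 1 => 1 | 3, 2 => 3 | 3, 3 => 2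
  | _, _ => 0

-- 'for i in range(n_bits - 1, -1, -1)' over state (d, state); i ≥ 0 throughout, hence i.toNat
def hilbert_index_2d_alt (n_bits : Int) (x : Int) (y : Int) : Int :=
  ((PySem.List.pyRange (n_bits - 1) (-1) (-1)).foldl
    (fun (p : Int × Int) (i : Int) =>
      let q := PySem.Int.bor
        (PySem.Int.band (x >>> i.toNat) 1 <<< (1:Nat)) (PySem.Int.band (y >>> i.toNat) 1)
      (PySem.Int.bor (p.1 <<< (2:Nat)) (pvDigitTable p.2 q), pvNextTable p.2 q))
    (0, 0)).1

-- ===== PRECONDITION & SPEC =====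
-- Python A raises ValueError ('negative shift count') for n_bits < 0; nothing else raises.
def Pre_hilbert_index_2d (n_bits : Int) (x : Int) (y : Int) : Prop := 0 ≤ n_bits
instance (n_bits : Int) (x : Int) (y : Int) : Decidable (Pre_hilbert_index_2d n_bits x y) := by
  unfold Pre_hilbert_index_2d; infer_instance
def pvWitness_hilbert_index_2d : Int × Int × Int := (2, 3, 1)

def Spec_hilbert_index_2d (n_bits : Int) (x : Int) (y : Int) (out : Int) : Prop := out = hilbert_index_2d_alt n_bits x y
instance (n_bits : Int) (x : Int) (y : Int) (out : Int) : Decidable (Spec_hilbert_index_2d n_bits x y out) := by unfold Spec_hilbert_index_2d; infer_instance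

-- ===== CLAIM (what is proved, stated in full; the proofs are below) =====
def Claim_equal_hilbert_index_2d : Prop := ∀ (n_bits : Int) (x : Int) (y : Int), Dom_hilbert_index_2d n_bits x y → Pre_hilbert_index_2d n_bits x y → Spec_hilbert_index_2d n_bits x y (hilbert_index_2d n_bits x y)

-- ===== LEMMAS AND PROOFS =====

-- Bit j of x in Python's infinite two's-complement reading (floor division).
def pvBit (x : Int) (j : Nat) : Bool := decide (x / 2 ^ j % 2 = 1)

-- The four reachable coordinate transforms of A's loop (identity / swap / swap+complement / complement).
inductive pvSt : Type where
  | s0 | s1 | s2 | s3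
deriving DecidableEq, Repr

def pvStInt : pvSt → Int
  | .s0 => 0 | .s1 => 1 | .s2 => 2 | .s3 => 3

-- bit read by A for rx (resp. ry) at a level, in terms of the untransformed bits
def pvTbx : pvSt → Bool → Bool → Bool
  | .s0, bx, _ => bx
  | .s1, _, by' => by'
  | .s2, _, by' => !by'
  | .s3, bx, _ => !bx

def pvTby : pvSt → Bool → Bool → Bool
  | .s0, _, by' => by'
  | .s1, bx, _ => bx
  | .s2, bx, _ => !bx
  | .s3, _, by' => !by'

def pvDig (st : pvSt) (bx by' : Bool) : Int :=
  pvDigitTable (pvStInt st) ((if bx then 2 else 0) + (if by' then 1 else 0))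

def pvNxt (st : pvSt) (bx by' : Bool) : pvSt :=
  match st, bx, by' with
  | .s0, false, false => .s1 | .s0, false, true => .s0 | .s0, true, false => .s2 | .s0, true, true => .s0
  | .s1, false, false => .s0 | .s1, false, true => .s3 | .s1, true, false => .s1 | .s1, true, true => .s1
  | .s2, false, false => .s2 | .s2, false, true => .s2 | .s2, true, false => .s0 | .s2, true, true => .s3
  | .s3, false, false => .s3 | .s3, false, true => .s1 | .s3, true, false => .s3 | .s3, true, true => .s2

-- reference value: Hilbert digits of bits k-1..0 starting in state st
def pvF (k : Nat) (x y : Int) (st : pvSt) : Int :=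
  match k with
  | 0 => 0
  | k + 1 => 4 ^ k * pvDig st (pvBit x k) (pvBit y k) + pvF k x y (pvNxt st (pvBit x k) (pvBit y k))

def pvFinalSt (k : Nat) (x y : Int) (st : pvSt) : pvSt :=
  match k with
  | 0 => st
  | k + 1 => pvFinalSt k x y (pvNxt st (pvBit x k) (pvBit y k))

-- ---- arithmetic bridges ----
lemma pv_neg_ediv (u c : Int) (hc : 0 < c) : (-1 - u) / c = -1 - u / c ∧ (-1 - u) % c = c - 1 - u % c := by
  have h := Int.ediv_emod_unique (a := -1 - u) (b := c) (q := -1 - u / c) (r := c - 1 - u % c) hc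
  have hu := Int.emod_add_ediv u c
  have h1 : 0 ≤ u % c := Int.emod_nonneg u (by omega)
  have h2 : u % c < c := Int.emod_lt_of_pos u hc
  exact h.mpr (by constructor; · ring_nf; ring_nf at hu ⊢; omega
                  · omega)

lemma pvBit_comp (u : Int) (j : Nat) : pvBit (-1 - u) j = ! pvBit u j := by
  have hc : (0:Int) < 2 ^ j := by positivity
  have h := pv_neg_ediv u (2 ^ j) hc
  have h2 := pv_neg_ediv (u / 2 ^ j) 2 (by norm_num)
  unfold pvBit
  rw [h.1]
  have h3 : (-1 - u / 2 ^ j) % 2 = 2 - 1 - u / 2 ^ j % 2 := h2.2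
  have hm1 : 0 ≤ u / 2 ^ j % 2 := Int.emod_nonneg _ (by norm_num)
  have hm2 : u / 2 ^ j % 2 < 2 := Int.emod_lt_of_pos _ (by norm_num)
  by_cases hb : u / 2 ^ j % 2 = 1 <;> simp [hb] <;> omega

lemma pvBit_flip (u : Int) (k j : Nat) (hj : j < k) : pvBit (2 ^ k - 1 - u) j = ! pvBit u j := by
  have hsplit : (2:Int) ^ k - 1 - u = (-1 - u) + 2 ^ (k - j) * 2 ^ j := by
    rw [← pow_add]
    have : k - j + j = k := by omega
    rw [this]; ring
  have hc : ((2:Int) ^ j) ≠ 0 := by positivity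
  unfold pvBit
  rw [hsplit, Int.add_mul_ediv_right _ _ hc]
  have hkj : (2:Int) ^ (k - j) = 2 * 2 ^ (k - j - 1) := by
    rw [← pow_succ']; congr 1; omega
  rw [hkj, Int.add_mul_emod_self_left]
  exact pvBit_comp u j

lemma pvBit_natCast (m : ℕ) (k : Nat) : pvBit (m : Int) k = m.testBit k := by
  unfold pvBit
  rw [Nat.testBit_eq_decide_div_mod_eq]
  rw [show ((2:Int) ^ k) = ((2 ^ k : ℕ) : Int) by push_cast; ring,
      ← Int.natCast_ediv, show ((2:Int)) = ((2 : ℕ) : Int) by norm_num, ← Int.natCast_emod]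
  norm_cast

lemma pv_band_pow (x : Int) (k : Nat) :
    PySem.Int.band x (2 ^ k) = if pvBit x k then 2 ^ k else 0 := by
  have hp : ((2:Int) ^ k) = ((2 ^ k : ℕ) : Int) := by push_cast; ring
  by_cases hx : 0 ≤ x
  · rw [PySem.Int.band_of_nonneg hx (by positivity)]
    have hb : pvBit x k = x.toNat.testBit k := by
      conv_lhs => rw [show x = ((x.toNat : ℕ) : Int) from (Int.toNat_of_nonneg hx).symm]
      exact pvBit_natCast _ _
    rw [hp, Int.toNat_natCast, Nat.and_two_pow, hb]
    cases htb : x.toNat.testBit k <;> simp only [htb, if_true, if_false, Bool.toNat_true, Bool.toNat_false, one_mul, zero_mul, Nat.cast_zero, Nat.cast_pow, Nat.cast_ofNat, hp.symm] <;> simp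
  · unfold PySem.Int.band
    rw [if_neg hx, if_pos (by positivity : (0:Int) ≤ 2 ^ k)]
    have hmx : x = -1 - ((-x - 1).toNat : Int) := by
      rw [Int.toNat_of_nonneg (by omega)]; ring
    have hb : pvBit x k = !((-x - 1).toNat.testBit k) := by
      conv_lhs => rw [hmx]
      rw [pvBit_comp, pvBit_natCast]
    rw [hp, Int.toNat_natCast, Nat.two_pow_and, hb]
    cases htb : (-x - 1).toNat.testBit k <;>
      simp only [htb, Bool.not_true, Bool.not_false, if_true, if_false, Bool.toNat_true,
        Bool.toNat_false, Nat.mul_one, Nat.mul_zero, Nat.sub_self, Nat.sub_zero,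
        Nat.cast_zero, hp.symm] <;> simp

lemma pv_mod_shift (x : Int) (k : Nat) :
    PySem.Int.mod (x >>> k) 2 = if pvBit x k then 1 else 0 := by
  rw [Int.shiftRight_eq_div_pow]
  unfold PySem.Int.mod pvBit
  rw [Int.fmod_eq_emod]
  rw [if_pos (Or.inl (by norm_num))]
  push_cast
  have hm1 : 0 ≤ x / 2 ^ k % 2 := Int.emod_nonneg _ (by norm_num)
  have hm2 : x / 2 ^ k % 2 < 2 := Int.emod_lt_of_pos _ (by norm_num)
  by_cases hb : x / 2 ^ k % 2 = 1 <;> simp [hb] <;> omega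

lemma pv_nat_or4 (a b : ℕ) (h : b < 4) : 4 * a ||| b = 4 * a + b := by
  apply Nat.eq_of_testBit_eq
  intro i
  rw [Nat.testBit_or, Bool.eq_iff_iff]
  simp only [Bool.or_eq_true, Nat.testBit_eq_decide_div_mod_eq, decide_eq_true_eq]
  match i with
  | 0 => simp only [pow_zero, Nat.div_one]; omega
  | 1 => simp only [pow_one]; omega
  | (i+2) =>
    have h1 : (0:ℕ) < 2 ^ i := Nat.pow_pos (by norm_num)
    have h4 : (2:ℕ) ^ (i+2) = 4 * 2 ^ i := by ring
    have e1 : 4 * a / (4 * 2 ^ i) = a / 2 ^ i := Nat.mul_div_mul_left a (2 ^ i) (by norm_num)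
    have e2 : b / (4 * 2 ^ i) = 0 := Nat.div_eq_of_lt (by nlinarith)
    have e3 : (4 * a + b) / (4 * 2 ^ i) = a / 2 ^ i := by
      rw [← Nat.div_div_eq_div_mul, Nat.mul_add_div (by norm_num), Nat.div_eq_of_lt h, Nat.add_zero]
    rw [h4, e1, e2, e3]
    omega

lemma pv_bor4 (d g : Int) (hd : 0 ≤ d) (hg : 0 ≤ g) (hg4 : g < 4) :
    PySem.Int.bor (d <<< (2:Nat)) g = 4 * d + g := by
  rw [Int.shiftLeft_eq, show (2:Int)^(2:Nat) = 4 by norm_num]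
  rw [PySem.Int.bor_of_nonneg (by positivity) hg]
  have h1 : (d * 4).toNat = 4 * d.toNat := by omega
  have h2 : g.toNat < 4 := by omega
  rw [h1, pv_nat_or4 _ _ h2]
  push_cast
  omega

lemma pv_band_shift_one (x : Int) (k : Nat) :
    PySem.Int.band (x >>> k) 1 = if pvBit x k then 1 else 0 := by
  rw [PySem.Int.band_one]; exact pv_mod_shift x k

-- one iteration of A's loop at mask 2^k, with the bit tests resolved to pvBit
lemma pv_loop_step (k : Nat) (u v d : Int) :
    pvHilbertLoop (2 ^ k) u v d =
      (let rx : Int := if pvBit u k then 1 else 0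
       let ry : Int := if pvBit v k then 1 else 0
       let d' := d + 2 ^ k * 2 ^ k * PySem.Int.bxor (3 * rx) ry
       let p := pvHilbertRot (2 ^ k) u v rx ry
       pvHilbertLoop (((2:Int) ^ k) >>> (1:Nat)) p.1 p.2 d') := by
  rw [pvHilbertLoop.eq_def, dif_pos (by positivity : (0:Int) < 2 ^ k)]
  simp only [pv_band_pow]
  cases hu : pvBit u k <;> cases hv : pvBit v k <;>
    simp [hu, hv, (by positivity : (0:Int) < 2 ^ k).ne']

lemma pv_pow_shift (k : Nat) : ((2:Int) ^ (k + 1)) >>> (1:Nat) = 2 ^ k := by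
  rw [Int.shiftRight_eq_div_pow]
  norm_num [pow_succ]

lemma pv_one_shift : ((2:Int) ^ 0) >>> (1:Nat) = 0 := by decide

lemma pv_loop_zero (u v d : Int) : pvHilbertLoop 0 u v d = d := by
  rw [pvHilbertLoop.eq_def]; norm_num

lemma pv_dig_bxor (st : pvSt) (bx by' : Bool) :
    PySem.Int.bxor (3 * (if pvTbx st bx by' then (1:Int) else 0)) (if pvTby st bx by' then (1:Int) else 0)
      = pvDig st bx by' := by
  cases st <;> cases bx <;> cases by' <;> decide

-- ---- A's loop computes pvF ----
lemma pv_loop_eq_F (k : Nat) : ∀ (st : pvSt) (x y u v d : Int),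
    (∀ j : Nat, j ≤ k → pvBit u j = pvTbx st (pvBit x j) (pvBit y j)) →
    (∀ j : Nat, j ≤ k → pvBit v j = pvTby st (pvBit x j) (pvBit y j)) →
    pvHilbertLoop (2 ^ k) u v d = d + pvF (k + 1) x y st := by
  induction k with
  | zero =>
    intro st x y u v d hbx hby
    have hu := hbx 0 (Nat.le_refl 0)
    have hv := hby 0 (Nat.le_refl 0)
    rw [pv_loop_step 0 u v d]
    simp only []
    rw [pv_one_shift, pv_loop_zero, hu, hv, pv_dig_bxor]
    rw [pvF, pvF]
    norm_num
  | succ k ih =>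
    intro st x y u v d hbx hby
    have hu := hbx (k+1) (Nat.le_refl (k+1))
    have hv := hby (k+1) (Nat.le_refl (k+1))
    rw [pv_loop_step (k+1) u v d]
    simp only []
    rw [pv_pow_shift, hu, hv, pv_dig_bxor]
    cases st <;> cases hX : pvBit x (k+1) <;> cases hY : pvBit y (k+1)
    · norm_num [pvTbx, pvTby, pvHilbertRot, hX, hY]
      rw [ih pvSt.s1 x y v u _
          (fun j hj => by rw [hby j (by omega)] <;> norm_num [pvTbx, pvTby, pvNxt, hX, hY])
          (fun j hj => by rw [hbx j (by omega)] <;> norm_num [pvTbx, pvTby, pvNxt, hX, hY])]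
      conv_rhs => rw [pvF]
      simp only [hX, hY]
      norm_num [pvNxt]
      rw [show (2:Int) ^ (k+1) * 2 ^ (k+1) = 4 ^ (k+1) from by rw [← mul_pow]; norm_num]
      ring
    · norm_num [pvTbx, pvTby, pvHilbertRot, hX, hY]
      rw [ih pvSt.s0 x y u v _
          (fun j hj => by rw [hbx j (by omega)] <;> norm_num [pvTbx, pvNxt, hX, hY])
          (fun j hj => by rw [hby j (by omega)] <;> norm_num [pvTby, pvNxt, hX, hY])]
      conv_rhs => rw [pvF]
      simp only [hX, hY]
      norm_num [pvNxt]
      rw [show (2:Int) ^ (k+1) * 2 ^ (k+1) = 4 ^ (k+1) from by rw [← mul_pow]; norm_num]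
      ring
    · norm_num [pvTbx, pvTby, pvHilbertRot, hX, hY]
      rw [ih pvSt.s2 x y (2 ^ (k+1) - 1 - v) (2 ^ (k+1) - 1 - u) _
          (fun j hj => by rw [pvBit_flip v (k+1) j (by omega), hby j (by omega)] <;> norm_num [pvTbx, pvTby, pvNxt, hX, hY])
          (fun j hj => by rw [pvBit_flip u (k+1) j (by omega), hbx j (by omega)] <;> norm_num [pvTbx, pvTby, pvNxt, hX, hY])]
      conv_rhs => rw [pvF]
      simp only [hX, hY]
      norm_num [pvNxt]
      rw [show (2:Int) ^ (k+1) * 2 ^ (k+1) = 4 ^ (k+1) from by rw [← mul_pow]; norm_num]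
      ring
    · norm_num [pvTbx, pvTby, pvHilbertRot, hX, hY]
      rw [ih pvSt.s0 x y u v _
          (fun j hj => by rw [hbx j (by omega)] <;> norm_num [pvTbx, pvNxt, hX, hY])
          (fun j hj => by rw [hby j (by omega)] <;> norm_num [pvTby, pvNxt, hX, hY])]
      conv_rhs => rw [pvF]
      simp only [hX, hY]
      norm_num [pvNxt]
      rw [show (2:Int) ^ (k+1) * 2 ^ (k+1) = 4 ^ (k+1) from by rw [← mul_pow]; norm_num]
      ring
    · norm_num [pvTbx, pvTby, pvHilbertRot, hX, hY]
      rw [ih pvSt.s0 x y v u _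
          (fun j hj => by rw [hby j (by omega)] <;> norm_num [pvTbx, pvTby, pvNxt, hX, hY])
          (fun j hj => by rw [hbx j (by omega)] <;> norm_num [pvTbx, pvTby, pvNxt, hX, hY])]
      conv_rhs => rw [pvF]
      simp only [hX, hY]
      norm_num [pvNxt]
      rw [show (2:Int) ^ (k+1) * 2 ^ (k+1) = 4 ^ (k+1) from by rw [← mul_pow]; norm_num]
      ring
    · norm_num [pvTbx, pvTby, pvHilbertRot, hX, hY]
      rw [ih pvSt.s3 x y (2 ^ (k+1) - 1 - v) (2 ^ (k+1) - 1 - u) _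
          (fun j hj => by rw [pvBit_flip v (k+1) j (by omega), hby j (by omega)] <;> norm_num [pvTbx, pvTby, pvNxt, hX, hY])
          (fun j hj => by rw [pvBit_flip u (k+1) j (by omega), hbx j (by omega)] <;> norm_num [pvTbx, pvTby, pvNxt, hX, hY])]
      conv_rhs => rw [pvF]
      simp only [hX, hY]
      norm_num [pvNxt]
      rw [show (2:Int) ^ (k+1) * 2 ^ (k+1) = 4 ^ (k+1) from by rw [← mul_pow]; norm_num]
      ring
    · norm_num [pvTbx, pvTby, pvHilbertRot, hX, hY]
      rw [ih pvSt.s1 x y u v _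
          (fun j hj => by rw [hbx j (by omega)] <;> norm_num [pvTbx, pvNxt, hX, hY])
          (fun j hj => by rw [hby j (by omega)] <;> norm_num [pvTby, pvNxt, hX, hY])]
      conv_rhs => rw [pvF]
      simp only [hX, hY]
      norm_num [pvNxt]
      rw [show (2:Int) ^ (k+1) * 2 ^ (k+1) = 4 ^ (k+1) from by rw [← mul_pow]; norm_num]
      ring
    · norm_num [pvTbx, pvTby, pvHilbertRot, hX, hY]
      rw [ih pvSt.s1 x y u v _
          (fun j hj => by rw [hbx j (by omega)] <;> norm_num [pvTbx, pvNxt, hX, hY])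
          (fun j hj => by rw [hby j (by omega)] <;> norm_num [pvTby, pvNxt, hX, hY])]
      conv_rhs => rw [pvF]
      simp only [hX, hY]
      norm_num [pvNxt]
      rw [show (2:Int) ^ (k+1) * 2 ^ (k+1) = 4 ^ (k+1) from by rw [← mul_pow]; norm_num]
      ring
    · norm_num [pvTbx, pvTby, pvHilbertRot, hX, hY]
      rw [ih pvSt.s2 x y u v _
          (fun j hj => by rw [hbx j (by omega)] <;> norm_num [pvTbx, pvNxt, hX, hY])
          (fun j hj => by rw [hby j (by omega)] <;> norm_num [pvTby, pvNxt, hX, hY])]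
      conv_rhs => rw [pvF]
      simp only [hX, hY]
      norm_num [pvNxt]
      rw [show (2:Int) ^ (k+1) * 2 ^ (k+1) = 4 ^ (k+1) from by rw [← mul_pow]; norm_num]
      ring
    · norm_num [pvTbx, pvTby, pvHilbertRot, hX, hY]
      rw [ih pvSt.s2 x y u v _
          (fun j hj => by rw [hbx j (by omega)] <;> norm_num [pvTbx, pvNxt, hX, hY])
          (fun j hj => by rw [hby j (by omega)] <;> norm_num [pvTby, pvNxt, hX, hY])]
      conv_rhs => rw [pvF]
      simp only [hX, hY]
      norm_num [pvNxt]
      rw [show (2:Int) ^ (k+1) * 2 ^ (k+1) = 4 ^ (k+1) from by rw [← mul_pow]; norm_num]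
      ring
    · norm_num [pvTbx, pvTby, pvHilbertRot, hX, hY]
      rw [ih pvSt.s0 x y (2 ^ (k+1) - 1 - v) (2 ^ (k+1) - 1 - u) _
          (fun j hj => by rw [pvBit_flip v (k+1) j (by omega), hby j (by omega)] <;> norm_num [pvTbx, pvTby, pvNxt, hX, hY])
          (fun j hj => by rw [pvBit_flip u (k+1) j (by omega), hbx j (by omega)] <;> norm_num [pvTbx, pvTby, pvNxt, hX, hY])]
      conv_rhs => rw [pvF]
      simp only [hX, hY]
      norm_num [pvNxt]
      rw [show (2:Int) ^ (k+1) * 2 ^ (k+1) = 4 ^ (k+1) from by rw [← mul_pow]; norm_num]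
      ring
    · norm_num [pvTbx, pvTby, pvHilbertRot, hX, hY]
      rw [ih pvSt.s3 x y v u _
          (fun j hj => by rw [hby j (by omega)] <;> norm_num [pvTbx, pvTby, pvNxt, hX, hY])
          (fun j hj => by rw [hbx j (by omega)] <;> norm_num [pvTbx, pvTby, pvNxt, hX, hY])]
      conv_rhs => rw [pvF]
      simp only [hX, hY]
      norm_num [pvNxt]
      rw [show (2:Int) ^ (k+1) * 2 ^ (k+1) = 4 ^ (k+1) from by rw [← mul_pow]; norm_num]
      ring
    · norm_num [pvTbx, pvTby, pvHilbertRot, hX, hY]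
      rw [ih pvSt.s3 x y u v _
          (fun j hj => by rw [hbx j (by omega)] <;> norm_num [pvTbx, pvNxt, hX, hY])
          (fun j hj => by rw [hby j (by omega)] <;> norm_num [pvTby, pvNxt, hX, hY])]
      conv_rhs => rw [pvF]
      simp only [hX, hY]
      norm_num [pvNxt]
      rw [show (2:Int) ^ (k+1) * 2 ^ (k+1) = 4 ^ (k+1) from by rw [← mul_pow]; norm_num]
      ring
    · norm_num [pvTbx, pvTby, pvHilbertRot, hX, hY]
      rw [ih pvSt.s1 x y (2 ^ (k+1) - 1 - v) (2 ^ (k+1) - 1 - u) _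
          (fun j hj => by rw [pvBit_flip v (k+1) j (by omega), hby j (by omega)] <;> norm_num [pvTbx, pvTby, pvNxt, hX, hY])
          (fun j hj => by rw [pvBit_flip u (k+1) j (by omega), hbx j (by omega)] <;> norm_num [pvTbx, pvTby, pvNxt, hX, hY])]
      conv_rhs => rw [pvF]
      simp only [hX, hY]
      norm_num [pvNxt]
      rw [show (2:Int) ^ (k+1) * 2 ^ (k+1) = 4 ^ (k+1) from by rw [← mul_pow]; norm_num]
      ring
    · norm_num [pvTbx, pvTby, pvHilbertRot, hX, hY]
      rw [ih pvSt.s3 x y u v _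
          (fun j hj => by rw [hbx j (by omega)] <;> norm_num [pvTbx, pvNxt, hX, hY])
          (fun j hj => by rw [hby j (by omega)] <;> norm_num [pvTby, pvNxt, hX, hY])]
      conv_rhs => rw [pvF]
      simp only [hX, hY]
      norm_num [pvNxt]
      rw [show (2:Int) ^ (k+1) * 2 ^ (k+1) = 4 ^ (k+1) from by rw [← mul_pow]; norm_num]
      ring
    · norm_num [pvTbx, pvTby, pvHilbertRot, hX, hY]
      rw [ih pvSt.s2 x y v u _
          (fun j hj => by rw [hby j (by omega)] <;> norm_num [pvTbx, pvTby, pvNxt, hX, hY])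
          (fun j hj => by rw [hbx j (by omega)] <;> norm_num [pvTbx, pvTby, pvNxt, hX, hY])]
      conv_rhs => rw [pvF]
      simp only [hX, hY]
      norm_num [pvNxt]
      rw [show (2:Int) ^ (k+1) * 2 ^ (k+1) = 4 ^ (k+1) from by rw [← mul_pow]; norm_num]
      ring


lemma pv_q_eq (bx by' : Bool) :
    PySem.Int.bor ((if bx then (1:Int) else 0) <<< (1:Nat)) (if by' then (1:Int) else 0)
      = (if bx then 2 else 0) + (if by' then 1 else 0) := by
  cases bx <;> cases by' <;> decide

lemma pv_next_bridge (st : pvSt) (bx by' : Bool) :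
    pvNextTable (pvStInt st) ((if bx then 2 else 0) + (if by' then 1 else 0))
      = pvStInt (pvNxt st bx by') := by
  cases st <;> cases bx <;> cases by' <;> decide

lemma pv_dig_lb (st : pvSt) (bx by' : Bool) :
    0 ≤ pvDigitTable (pvStInt st) ((if bx then 2 else 0) + (if by' then 1 else 0)) := by
  cases st <;> cases bx <;> cases by' <;> decide

lemma pv_dig_ub (st : pvSt) (bx by' : Bool) :
    pvDigitTable (pvStInt st) ((if bx then 2 else 0) + (if by' then 1 else 0)) < 4 := by
  cases st <;> cases bx <;> cases by' <;> decide

-- ---- B's fold computes pvF ----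
lemma pv_fold_eq_F (k : Nat) : ∀ (x y d0 : Int) (st : pvSt), 0 ≤ d0 →
    (PySem.List.pyRange ((k : Int) - 1) (-1) (-1)).foldl
      (fun (p : Int × Int) (i : Int) =>
        (PySem.Int.bor (p.1 <<< (2:Nat))
           (pvDigitTable p.2 (PySem.Int.bor
             (PySem.Int.band (x >>> i.toNat) 1 <<< (1:Nat)) (PySem.Int.band (y >>> i.toNat) 1))),
         pvNextTable p.2 (PySem.Int.bor
           (PySem.Int.band (x >>> i.toNat) 1 <<< (1:Nat)) (PySem.Int.band (y >>> i.toNat) 1))))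
      (d0, pvStInt st)
    = (d0 * 4 ^ k + pvF k x y st, pvStInt (pvFinalSt k x y st)) := by
  induction k with
  | zero =>
    intro x y d0 st hd
    rw [PySem.List.pyRange_neg_one_eq_nil (by norm_num)]
    simp [pvF, pvFinalSt]
  | succ k ih =>
    intro x y d0 st hd
    rw [show ((k + 1 : Nat) : Int) - 1 = (k : Int) from by push_cast; ring,
        PySem.List.pyRange_neg_one_cons (by omega), List.foldl_cons]
    simp only []
    rw [show ((k : Int)).toNat = k from Int.toNat_natCast k,
        pv_band_shift_one x k, pv_band_shift_one y k,
        pv_q_eq (pvBit x k) (pvBit y k),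
        pv_next_bridge st (pvBit x k) (pvBit y k),
        pv_bor4 d0 _ hd (pv_dig_lb st _ _) (pv_dig_ub st _ _),
        ih x y _ (pvNxt st (pvBit x k) (pvBit y k))
          (by have h1 := pv_dig_lb st (pvBit x k) (pvBit y k); omega),
        pvF, pvFinalSt]
    simp only [Prod.mk.injEq, pvDig]
    exact ⟨by ring, trivial⟩

-- ===== VERDICT (by name: the statement is the Claim_ definition above) =====
theorem hilbert_index_2d_spec : Claim_equal_hilbert_index_2d := by
  unfold Claim_equal_hilbert_index_2d
  intro n_bits x y _ hpre
  unfold Spec_hilbert_index_2d hilbert_index_2d hilbert_index_2d_alt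
  simp only []
  have hpre' : (0:Int) ≤ n_bits := hpre
  have hcast : n_bits = ((n_bits.toNat : Nat) : Int) := (Int.toNat_of_nonneg hpre').symm
  rw [Int.shiftLeft_eq, one_mul, hcast]
  simp only [Int.toNat_natCast]
  generalize n_bits.toNat = k
  rw [show ((0:Int), (0:Int)) = ((0:Int), pvStInt pvSt.s0) from rfl,
      pv_fold_eq_F k x y 0 pvSt.s0 le_rfl]
  cases k with
  | zero =>
    rw [pv_one_shift, pv_loop_zero]
    simp [pvF]
  | succ k =>
    rw [pv_pow_shift, pv_loop_eq_F k pvSt.s0 x y x y 0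
        (fun j hj => by simp [pvTbx]) (fun j hj => by simp [pvTby])]
    simp
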